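-- pv_equiv track=rewrite | github.com/jinzaizhichi/retain-pdf | backend/scripts/services/document_schema/provider_adapters/paddle/body_repair.py | _choose_split_index
-- ===== SOURCE A (Python) =====
-- def _choose_split_index(text: str, target_index: int) -> int | None:
--     length = len(text)
--     if length < 2:
--         return None
--     lower = max(4, target_index - max(8, length // 6))
--     upper = min(length - 4, target_index + max(8, length // 6))
--     if lower >= upper:
--         return None
--
--     preferred = []
--     for index, char in enumerate(text):
--         if char == "\n":
--             preferred.append(index)
--         elif char.isspace():
--             preferred.append(index)
--
--     candidates = [index for index in preferred if lower <= index <= upper]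
--     if not candidates:
--         return None
--     return min(candidates, key=lambda index: abs(index - target_index))
-- ===== SOURCE B (Python) =====
-- def _choose_split_index(text: str, target_index: int) -> int | None:
--     length = len(text)
--     if length < 2:
--         return None
--     window = max(8, length // 6)
--     lower = max(4, target_index - window)
--     upper = min(length - 4, target_index + window)
--     if lower >= upper:
--         return None
--     # Search outward from target_index; the lower side is tried first at each
--     # distance, which reproduces the lower-index preference on ties.
--     d = 0
--     while target_index - d >= lower or target_index + d <= upper:
--         left = target_index - d
--         if lower <= left <= upper and text[left].isspace():
--             return left
--         right = target_index + d
--         if lower <= right <= upper and text[right].isspace():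
--             return right
--         d += 1
--     return None
-- ===== Notes on version B (the rewrite author's own statement) =====
-- stated objective: alternative
-- what changed: Instead of scanning the whole text to collect all whitespace indices, filtering them to the window and taking min by distance, B searches outward from target_index (lower side first at each distance) and returns the first whitespace index found in the window.
import Mathlib
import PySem

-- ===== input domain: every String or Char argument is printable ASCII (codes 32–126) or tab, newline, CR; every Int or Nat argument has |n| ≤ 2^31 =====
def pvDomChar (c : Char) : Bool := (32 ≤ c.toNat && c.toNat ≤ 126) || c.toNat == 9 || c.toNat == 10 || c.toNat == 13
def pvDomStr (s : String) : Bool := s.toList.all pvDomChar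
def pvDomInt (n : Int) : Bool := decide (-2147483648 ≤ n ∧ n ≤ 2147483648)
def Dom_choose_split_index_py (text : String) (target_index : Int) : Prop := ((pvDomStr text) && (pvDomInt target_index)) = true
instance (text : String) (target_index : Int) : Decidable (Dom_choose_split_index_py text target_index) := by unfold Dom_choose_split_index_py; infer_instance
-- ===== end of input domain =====

-- B replaces A's full scan (collect all whitespace indices, filter to the window, min by
-- distance) with an outward search from target_index that returns the first whitespace
-- index found in the window (lower side first on each distance, matching A's tie-break).

-- ===== PORT A =====
def choose_split_index_py (text : String) (target_index : Int) : Option Int :=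
  let cs := text.toList
  let length : Int := PySem.Chars.len cs
  if length < 2 then none else
  let lower := max 4 (target_index - max 8 (PySem.Int.floordiv length 6))
  let upper := min (length - 4) (target_index + max 8 (PySem.Int.floordiv length 6))
  if lower ≥ upper then none else
  let preferred : List Int := (PySem.List.enumerate cs).foldl
    (fun acc p => if p.2 == '\n' then acc ++ [p.1]
      else if PySem.Chars.isspace p.2 then acc ++ [p.1] else acc) []
  let candidates := preferred.filter (fun i => decide (lower ≤ i ∧ i ≤ upper))
  if candidates = [] then none
  else PySem.List.min? candidates (fun i => |i - target_index|)

-- ===== PORT B =====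
-- text[i].isspace(); in pvSearchOut the window guard is checked first (Python's
-- short-circuit `and`), so pyGet? is always `some` when this is read.
def pvIsWsAt (cs : List Char) (i : Int) : Bool :=
  ((PySem.List.pyGet? cs i).map PySem.Chars.isspace).getD false

-- the while loop; `fuel` is only a structural totality guard (the loop stops by itself
-- once d exceeds max (t - lower) (upper - t), and the initial fuel covers exactly that)
def pvSearchOut (cs : List Char) (t lower upper : Int) (d : Nat) : Nat → Option Int
  | 0 => none
  | fuel + 1 =>
    if t - d < lower ∧ upper < t + d then none
    else if lower ≤ t - d ∧ t - d ≤ upper ∧ pvIsWsAt cs (t - d) then some (t - d)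
    else if lower ≤ t + d ∧ t + d ≤ upper ∧ pvIsWsAt cs (t + d) then some (t + d)
    else pvSearchOut cs t lower upper (d + 1) fuel

def choose_split_index_py_alt (text : String) (target_index : Int) : Option Int :=
  let cs := text.toList
  let length : Int := PySem.Chars.len cs
  if length < 2 then none else
  let window := max 8 (PySem.Int.floordiv length 6)
  let lower := max 4 (target_index - window)
  let upper := min (length - 4) (target_index + window)
  if lower ≥ upper then none
  else pvSearchOut cs target_index lower upper 0 (max (target_index - lower) (upper - target_index) + 1).toNat

-- ===== PRECONDITION & SPEC =====
def Spec_choose_split_index_py (text : String) (target_index : Int) (out : Option Int) : Prop := out = choose_split_index_py_alt text target_index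
instance (text : String) (target_index : Int) (out : Option Int) : Decidable (Spec_choose_split_index_py text target_index out) := by unfold Spec_choose_split_index_py; infer_instance

-- ===== CLAIM (what is proved, stated in full; the proofs are below) =====
def Claim_equal_choose_split_index_py : Prop := ∀ (text : String) (target_index : Int), Dom_choose_split_index_py text target_index → Spec_choose_split_index_py text target_index (choose_split_index_py text target_index)

-- ===== LEMMAS AND PROOFS =====

-- the window candidates of A, in ascending index order
def pvCands (cs : List Char) (lower upper : Int) : List Int :=
  (PySem.List.pyRange 0 (PySem.Chars.len cs)).filter
    (fun j => PySem.Chars.isspace (PySem.List.pyGetD cs j ' ') && decide (lower ≤ j ∧ j ≤ upper))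

lemma pvCands_mem (cs : List Char) (lower upper j : Int) :
    j ∈ pvCands cs lower upper ↔
      (0 ≤ j ∧ j < cs.length ∧ PySem.Chars.isspace (PySem.List.pyGetD cs j ' ') = true
        ∧ lower ≤ j ∧ j ≤ upper) := by
  simp [pvCands, PySem.List.mem_pyRange_one, PySem.Chars.len]
  tauto

lemma pvCands_pairwise (cs : List Char) (lower upper : Int) :
    (pvCands cs lower upper).Pairwise (· < ·) := by
  rw [pvCands]

  apply List.Pairwise.filter
  unfold PySem.List.pyRange
  split
  · simp
  · refine List.pairwise_map.mpr ?_
    have := List.pairwise_lt_range (n := (if (0:Int) < 1 then if (0:Int) < PySem.Chars.len cs then ((PySem.Chars.len cs - 0 + 1 - 1) / 1).toNat else 0 else if PySem.Chars.len cs < 0 then ((0 - PySem.Chars.len cs + -1 - 1) / -1).toNat else 0))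
    exact this.imp (by intro a b h; omega)

-- first-minimum characterisation of Python's min(key=…) on an ascending list
lemma pv_min?_acc (key : Int → Int) :
    ∀ (xs : List Int) (a m : Int), (a :: xs).Pairwise (· < ·) → m ∈ a :: xs →
    (∀ j ∈ a :: xs, key m < key j ∨ (key m = key j ∧ m ≤ j)) →
    xs.foldl (fun acc x => match acc with
      | none => some x
      | some b => if key x < key b then some x else some b) (some a) = some m := by
  intro xs
  induction xs with
  | nil =>
    intro a m _ hm _
    simp at hm; simp [hm]
  | cons x rest ih =>
    intro a m hsort hm hmin
    have hax : a < x := by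
      have := List.pairwise_cons.mp hsort
      exact this.1 x (by simp)
    simp only [List.foldl_cons]
    rw [show (if key x < key a then some x else some a : Option Int) = some (if key x < key a then x else a) from by by_cases h : key x < key a <;> simp [h]]
    set a' := if key x < key a then x else a with ha'
    have ha'mem : a' = a ∨ a' = x := by by_cases h : key x < key a <;> simp [ha', h]
    have hsort' : (a' :: rest).Pairwise (· < ·) := by
      rcases List.pairwise_cons.mp hsort with ⟨h1, h2⟩
      rcases List.pairwise_cons.mp h2 with ⟨h3, h4⟩
      refine List.pairwise_cons.mpr ⟨?_, h4⟩
      intro b hb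
      rcases ha'mem with h | h <;> rw [h]
      · exact h1 b (by simp [hb])
      · exact h3 b hb
    apply ih a' m hsort'
    · -- m ∈ a' :: rest
      simp only [List.mem_cons] at hm
      rcases hm with hm | hm | hm
      · -- m = a : show a' = a
        subst hm
        have := hmin x (by simp)
        have hkey : ¬ key x < key m := by
          rcases this with h | ⟨h, h2⟩
          · omega
          · omega
        simp [ha', hkey]
      · subst hm
        have := hmin a (by simp)
        have hkey : key m < key a := by
          rcases this with h | ⟨h, h2⟩
          · exact h
          · omega
        simp [ha', hkey]
      · simp [List.mem_cons, hm]
    · intro j hj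
      simp only [List.mem_cons] at hj
      rcases hj with hj | hj
      · subst hj
        rcases ha'mem with h | h <;> rw [h]
        · exact hmin a (by simp)
        · exact hmin x (by simp)
      · exact hmin j (by simp [List.mem_cons, hj])

lemma pv_min?_eq_of (xs : List Int) (key : Int → Int) (m : Int)
    (hsort : xs.Pairwise (· < ·)) (hm : m ∈ xs)
    (hmin : ∀ j ∈ xs, key m < key j ∨ (key m = key j ∧ m ≤ j)) :
    PySem.List.min? xs key = some m := by
  cases xs with
  | nil => simp at hm
  | cons a rest =>
    have := pv_min?_acc key rest a m hsort hm hmin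
    rw [PySem.List.min?]
    simp only [List.foldl_cons]
    convert this using 2
    funext acc x
    cases acc <;> rfl

lemma pvIsWsAt_eq (cs : List Char) (i : Int) (h0 : 0 ≤ i) (h1 : i < cs.length) :
    pvIsWsAt cs i = PySem.Chars.isspace (PySem.List.pyGetD cs i ' ') := by
  have : i = ((i.toNat : Nat) : Int) := by omega
  rw [pvIsWsAt, this, PySem.List.pyGet?_natCast, PySem.List.pyGetD_natCast]
  have h : i.toNat < cs.length := by omega
  simp [List.getD, List.getElem?_eq_getElem h]

lemma pv_search_eq_min (cs : List Char) (t lower upper : Int)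
    (hl : 4 ≤ lower) (hu : upper ≤ (cs.length : Int) - 4) (fuel : Nat) :
    ∀ (d : Nat), max (t - lower) (upper - t) + 1 ≤ (d : Int) + fuel →
    (∀ j ∈ pvCands cs lower upper, (d : Int) ≤ |j - t|) →
    pvSearchOut cs t lower upper d fuel = PySem.List.min? (pvCands cs lower upper) (fun i => |i - t|) := by
  induction fuel with
  | zero =>
    intro d hf hinv
    rw [pvSearchOut]
    symm
    rw [PySem.List.min?_eq_none_iff, List.eq_nil_iff_forall_not_mem]
    intro j hj
    have h1 := (pvCands_mem cs lower upper j).mp hj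
    have h2 := hinv j hj
    have h3 : |j - t| < (d : Int) := abs_lt.mpr ⟨by omega, by omega⟩
    omega
  | succ fuel ih =>
    intro d hf hinv
    rw [pvSearchOut]
    by_cases hstop : t - d < lower ∧ upper < t + d
    · rw [if_pos hstop]
      symm
      rw [PySem.List.min?_eq_none_iff, List.eq_nil_iff_forall_not_mem]
      intro j hj
      have h1 := (pvCands_mem cs lower upper j).mp hj
      have h2 := hinv j hj
      have h3 : |j - t| < (d : Int) := abs_lt.mpr ⟨by omega, by omega⟩
      omega
    · rw [if_neg hstop]
      by_cases hhit : lower ≤ t - d ∧ t - d ≤ upper ∧ pvIsWsAt cs (t - d)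
      · rw [if_pos hhit]
        symm
        obtain ⟨hL, hU, hW⟩ := hhit
        have hmem : (t - d) ∈ pvCands cs lower upper := by
          rw [pvCands_mem]
          refine ⟨by omega, by omega, ?_, hL, hU⟩
          rw [← pvIsWsAt_eq cs _ (by omega) (by omega)]; exact hW
        apply pv_min?_eq_of _ _ _ (pvCands_pairwise cs lower upper) hmem
        intro j hj
        have hjc := (pvCands_mem cs lower upper j).mp hj
        have hdle := hinv j hj
        have hkm : |t - d - t| = (d : Int) := by
          have : t - d - t = -(d : Int) := by ring
          rw [this, abs_neg, abs_of_nonneg (by omega)]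
        by_cases heq : |j - t| = (d : Int)
        · right
          constructor
          · omega
          · have := abs_eq (a := j - t) (b := (d : Int)) (by omega)
            rcases this.mp heq with h | h <;> omega
        · left; omega
      · rw [if_neg hhit]
        by_cases hhit2 : lower ≤ t + d ∧ t + d ≤ upper ∧ pvIsWsAt cs (t + d)
        · rw [if_pos hhit2]
          symm
          obtain ⟨hL, hU, hW⟩ := hhit2
          have hmem : (t + d) ∈ pvCands cs lower upper := by
            rw [pvCands_mem]
            refine ⟨by omega, by omega, ?_, hL, hU⟩
            rw [← pvIsWsAt_eq cs _ (by omega) (by omega)]; exact hW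
          apply pv_min?_eq_of _ _ _ (pvCands_pairwise cs lower upper) hmem
          intro j hj
          have hjc := (pvCands_mem cs lower upper j).mp hj
          have hdle := hinv j hj
          have hkm : |t + d - t| = (d : Int) := by
            have : t + d - t = (d : Int) := by ring
            rw [this, abs_of_nonneg (by omega)]
          by_cases heq : |j - t| = (d : Int)
          · have := (abs_eq (a := j - t) (b := (d : Int)) (by omega)).mp heq
            rcases this with h | h
            · right; omega
            · exfalso
              apply hhit
              obtain ⟨hj0, hjlen, hjws, hjl, hju⟩ := hjc
              refine ⟨by omega, by omega, ?_⟩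
              rw [pvIsWsAt_eq cs _ (by omega) (by omega)]
              rw [show t - (d:Int) = j by omega]
              exact hjws
          · left; omega
        · rw [if_neg hhit2]
          apply ih (d + 1) (by push_cast; omega)
          intro j hj
          have hjc := (pvCands_mem cs lower upper j).mp hj
          have hdle := hinv j hj
          by_cases heq : |j - t| = (d : Int)
          · exfalso
            obtain ⟨hj0, hjlen, hjws, hjl, hju⟩ := hjc
            have := (abs_eq (a := j - t) (b := (d : Int)) (by omega)).mp heq
            rcases this with h | h
            · apply hhit2
              refine ⟨by omega, by omega, ?_⟩
              rw [pvIsWsAt_eq cs _ (by omega) (by omega), show t + (d:Int) = j by omega]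
              exact hjws
            · apply hhit
              refine ⟨by omega, by omega, ?_⟩
              rw [pvIsWsAt_eq cs _ (by omega) (by omega), show t - (d:Int) = j by omega]
              exact hjws
          · push_cast; omega

lemma pvPreferred_eq (cs : List Char) :
    ((PySem.List.enumerate cs).foldl
      (fun acc p => if p.2 == '\n' then acc ++ [p.1]
        else if PySem.Chars.isspace p.2 then acc ++ [p.1] else acc) [])
    = (PySem.List.pyRange 0 (PySem.Chars.len cs)).filter
        (fun j => PySem.Chars.isspace (PySem.List.pyGetD cs j ' ')) := by
  have hf : (fun (acc : List Int) (p : Int × Char) => if p.2 == '\n' then acc ++ [p.1]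
        else if PySem.Chars.isspace p.2 then acc ++ [p.1] else acc)
      = (fun acc p => if (PySem.Chars.isspace p.2 : Bool) = true then acc ++ [(fun q : Int × Char => q.1) p] else acc) := by
    funext acc p
    by_cases h : p.2 == '\n'
    · have : p.2 = '\n' := by exact beq_iff_eq.mp h
      simp [this, PySem.Chars.isspace]
    · simp [h]
  rw [hf, PySem.List.foldl_append_if]
  rw [PySem.List.enumerate_eq_map_pyRange cs ' ']
  rw [List.filter_map, List.map_map]
  simp [Function.comp_def]

-- ===== VERDICT (by name: the statement is the Claim_ definition above) =====
theorem choose_split_index_py_spec : Claim_equal_choose_split_index_py := by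
  intro text t _
  show choose_split_index_py text t = choose_split_index_py_alt text t
  simp only [choose_split_index_py, choose_split_index_py_alt]
  set cs := text.toList with hcs
  set L : Int := PySem.Chars.len cs with hLdef
  have hL : L = (cs.length : Int) := by rw [hLdef, PySem.Chars.len]
  by_cases h2 : L < 2
  · simp [h2]
  · rw [if_neg h2, if_neg h2]
    set lower := max 4 (t - max 8 (PySem.Int.floordiv L 6)) with hlow
    set upper := min (L - 4) (t + max 8 (PySem.Int.floordiv L 6)) with hup
    by_cases hlu : lower ≥ upper
    · rw [if_pos hlu, if_pos hlu]
    · rw [if_neg hlu, if_neg hlu]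
      rw [pvPreferred_eq]
      have hcands : ((PySem.List.pyRange 0 (PySem.Chars.len cs)).filter
          (fun j => PySem.Chars.isspace (PySem.List.pyGetD cs j ' '))).filter
            (fun i => decide (lower ≤ i ∧ i ≤ upper)) = pvCands cs lower upper := by
        rw [List.filter_filter, pvCands]
        congr 1
        funext a
        exact Bool.and_comm _ _
      rw [hcands]
      rw [pv_search_eq_min cs t lower upper (le_max_left _ _)
        (by rw [← hL]; exact le_trans (min_le_left _ _) (by omega))
        (max (t - lower) (upper - t) + 1).toNat 0 (by omega)
        (fun j _ => by exact_mod_cast abs_nonneg (j - t))]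
      by_cases hnil : pvCands cs lower upper = []
      · rw [if_pos hnil, hnil, PySem.List.min?]; rfl
      · rw [if_neg hnil]
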